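-- pv_equiv track=rewrite | github.com/d4rkwyng/sierravault | scripts/quality_report.py | categorize_results
-- ===== SOURCE A (Python) =====
-- from typing import Dict, List, Optional
--
-- def categorize_results(results: List[Dict]) -> Dict[str, List[Dict]]:
--     """Categorize results by status."""
--     categories = {
--         'pass': [],
--         'review': [],
--         'fail': []
--     }
--
--     for result in results:
--         score = result.get('score', 0)
--         if score >= 90:
--             categories['pass'].append(result)
--         elif score >= 70:
--             categories['review'].append(result)
--         else:
--             categories['fail'].append(result)
--
--     return categories
-- ===== SOURCE B (Python) =====
-- def categorize_results(results):
--     """Categorize results by status."""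
--     return {
--         'pass': [r for r in results if r.get('score', 0) >= 90],
--         'review': [r for r in results if 70 <= r.get('score', 0) < 90],
--         'fail': [r for r in results if r.get('score', 0) < 70],
--     }
-- ===== Notes on version B (the rewrite author's own statement) =====
-- stated objective: idiomatic
-- what changed: Replaces the single branching accumulation loop with a dict literal built from three independent filtering comprehensions, one per category.
import Mathlib
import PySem

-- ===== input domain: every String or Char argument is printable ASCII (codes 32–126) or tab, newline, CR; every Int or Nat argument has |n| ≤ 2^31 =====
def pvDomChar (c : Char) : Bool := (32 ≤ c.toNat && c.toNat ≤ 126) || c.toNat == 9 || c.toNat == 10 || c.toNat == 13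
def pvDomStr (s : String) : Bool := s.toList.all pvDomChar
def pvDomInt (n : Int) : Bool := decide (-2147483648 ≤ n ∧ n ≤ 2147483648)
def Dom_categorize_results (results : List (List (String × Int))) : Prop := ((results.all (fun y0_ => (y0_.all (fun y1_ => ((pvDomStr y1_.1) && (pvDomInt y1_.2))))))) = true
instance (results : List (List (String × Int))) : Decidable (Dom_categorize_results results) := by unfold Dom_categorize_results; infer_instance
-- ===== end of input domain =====

-- B replaces A's single branching accumulation loop by three independent filtering passes (idiomatic dict literal); same cost.

-- ===== PORT A =====
-- A: one pass appending each result to the 'pass'/'review'/'fail' entry of a dict.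
def categorize_results (results : List (List (String × Int))) : List (String × List (List (String × Int))) :=
  let categories : PySem.Dict String (List (List (String × Int))) :=
    ((PySem.Dict.empty.insert "pass" []).insert "review" []).insert "fail" []
  let categories := results.foldl (fun cats result =>
    let score := (PySem.Dict.mk result).getD "score" 0
    if score ≥ 90 then cats.modify "pass" [] (· ++ [result])
    else if score ≥ 70 then cats.modify "review" [] (· ++ [result])
    else cats.modify "fail" [] (· ++ [result])) categories
  categories.items

-- ===== PORT B =====
-- B: r.get('score', 0)
def pvScore (r : List (String × Int)) : Int := (PySem.Dict.mk r).getD "score" 0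

def categorize_results_alt (results : List (List (String × Int))) : List (String × List (List (String × Int))) :=
  [("pass",   results.filter (fun r => 90 ≤ pvScore r)),
   ("review", results.filter (fun r => 70 ≤ pvScore r && pvScore r < 90)),
   ("fail",   results.filter (fun r => pvScore r < 70))]

-- ===== PRECONDITION & SPEC =====
def Spec_categorize_results (results : List (List (String × Int))) (out : List (String × List (List (String × Int)))) : Prop := out = categorize_results_alt results
instance (results : List (List (String × Int))) (out : List (String × List (List (String × Int)))) : Decidable (Spec_categorize_results results out) := by unfold Spec_categorize_results; infer_instance

-- ===== CLAIM (what is proved, stated in full; the proofs are below) =====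
def Claim_equal_categorize_results : Prop := ∀ (results : List (List (String × Int))), Dom_categorize_results results → Spec_categorize_results results (categorize_results results)

-- ===== LEMMAS AND PROOFS =====

-- Loop invariant for A's fold: starting from a dict with exactly the three keys
-- "pass"/"review"/"fail" holding p, r, f, the fold appends each category's filter.
theorem categorize_fold_inv (results : List (List (String × Int)))
    (p r f : List (List (String × Int))) :
    (results.foldl (fun cats result =>
        let score := (PySem.Dict.mk result).getD "score" 0
        if score ≥ 90 then cats.modify "pass" [] (· ++ [result])
        else if score ≥ 70 then cats.modify "review" [] (· ++ [result])
        else cats.modify "fail" [] (· ++ [result]))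
      (PySem.Dict.mk [("pass", p), ("review", r), ("fail", f)])).items
    = [("pass",   p ++ results.filter (fun x => 90 ≤ pvScore x)),
       ("review", r ++ results.filter (fun x => 70 ≤ pvScore x && pvScore x < 90)),
       ("fail",   f ++ results.filter (fun x => pvScore x < 70))] := by
  induction results generalizing p r f with
  | nil => simp
  | cons hd tl ih =>
    simp only [List.foldl_cons, List.filter_cons]
    by_cases h90 : (90 : Int) ≤ pvScore hd
    · have : ((PySem.Dict.mk [("pass", p), ("review", r), ("fail", f)]).modify "pass" []
          (· ++ [hd])) = PySem.Dict.mk [("pass", p ++ [hd]), ("review", r), ("fail", f)] := by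
        simp [PySem.Dict.modify, PySem.Dict.insert, PySem.Dict.getD, PySem.Dict.get?,
          PySem.Dict.contains]
      simp only [pvScore] at h90
      have hn : ¬ (PySem.Dict.mk hd).getD "score" 0 < 90 := by omega
      simp [h90, hn, this, ih, pvScore]
      omega
    · by_cases h70 : (70 : Int) ≤ pvScore hd
      · have : ((PySem.Dict.mk [("pass", p), ("review", r), ("fail", f)]).modify "review" []
            (· ++ [hd])) = PySem.Dict.mk [("pass", p), ("review", r ++ [hd]), ("fail", f)] := by
          simp [PySem.Dict.modify, PySem.Dict.insert, PySem.Dict.getD, PySem.Dict.get?,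
            PySem.Dict.contains]
        simp only [pvScore] at h90 h70
        simp [h90, h70, this, ih, pvScore]
      · have : ((PySem.Dict.mk [("pass", p), ("review", r), ("fail", f)]).modify "fail" []
            (· ++ [hd])) = PySem.Dict.mk [("pass", p), ("review", r), ("fail", f ++ [hd])] := by
          simp [PySem.Dict.modify, PySem.Dict.insert, PySem.Dict.getD, PySem.Dict.get?,
            PySem.Dict.contains]
        simp only [pvScore] at h90 h70
        have hlt : (PySem.Dict.mk hd).getD "score" 0 < 70 := by omega
        simp [h90, h70, hlt, this, ih, pvScore]

-- ===== VERDICT (by name: the statement is the Claim_ definition above) =====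
theorem categorize_results_spec : Claim_equal_categorize_results := by
  intro results _
  unfold Spec_categorize_results categorize_results categorize_results_alt
  have hinit : (((PySem.Dict.empty.insert "pass" ([] : List (List (String × Int)))).insert "review" []).insert "fail" [])
      = PySem.Dict.mk [("pass", []), ("review", []), ("fail", [])] := by
    simp [PySem.Dict.empty, PySem.Dict.insert, PySem.Dict.contains]
  simp only [hinit]
  rw [categorize_fold_inv]
  simp
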